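-- pv_equiv track=rewrite | github.com/danielzahnd/various-documents | newcomb-benford-law/code/utils.py | extract_number_phrases
-- ===== SOURCE A (Python) =====
-- def extract_number_phrases(words):
--     '''
--     This function extracts sequences of number-related words (e.g. "twenty one", "three hundred")
--     from a list of individual words. Each sequence is returned as a list of words.
--
--     INPUT
--     -----
--     words (list of str): A list of words, typically obtained from text.split()
--
--     OUTPUT
--     ------
--     word_number_phrases (list of list of str): List of number word sequences
--     '''
--     # Define acceptable number words
--     number_vocab = [
--         'one', 'two', 'three', 'four', 'five', 'six', 'seven', 'eight', 'nine', 'ten',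
--         'eleven', 'twelve', 'thirteen', 'fourteen', 'fifteen', 'sixteen', 'seventeen',
--         'eighteen', 'nineteen', 'twenty', 'thirty', 'forty', 'fifty', 'sixty', 'seventy',
--         'eighty', 'ninety', 'hundred', 'thousand', 'million', 'billion', 'trillion', 'and'
--     ]
--
--     # Define iterables
--     word_number_phrases = []
--     i = 0
--
--     # Iterate through all words in the list
--     while i < len(words):
--         phrase = []
--
--         # If current word is number-related, start collecting the phrase
--         while i < len(words) and words[i] in number_vocab:
--             phrase.append(words[i])
--             i += 1
--
--         # Clean up 'and' at start/end of phrase or move to next word if current is not a number word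
--         if phrase:
--             if phrase[0] == 'and':
--                 phrase = phrase[1:]
--             if phrase and phrase[-1] == 'and':
--                 phrase = phrase[:-1]
--
--             # Append number if phrase is not empty
--             if phrase:
--                 word_number_phrases.append(phrase)
--         else:
--             i += 1
--
--     # Return found numbers as phrases
--     return word_number_phrases
-- ===== SOURCE B (Python) =====
-- NUMBER_VOCAB = frozenset([
--     'one', 'two', 'three', 'four', 'five', 'six', 'seven', 'eight', 'nine', 'ten',
--     'eleven', 'twelve', 'thirteen', 'fourteen', 'fifteen', 'sixteen', 'seventeen',
--     'eighteen', 'nineteen', 'twenty', 'thirty', 'forty', 'fifty', 'sixty', 'seventy',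
--     'eighty', 'ninety', 'hundred', 'thousand', 'million', 'billion', 'trillion', 'and'
-- ])
--
--
-- def extract_number_phrases(words):
--     # Staged passes: membership mask, then run boundaries by index, then slices.
--     n = len(words)
--     mask = [w in NUMBER_VOCAB for w in words]
--     starts = [i for i in range(n) if mask[i] and (i == 0 or not mask[i - 1])]
--     ends = [i + 1 for i in range(n) if mask[i] and (i == n - 1 or not mask[i + 1])]
--     phrases = []
--     for s, e in zip(starts, ends):
--         if words[s] == 'and':       # strip one leading 'and' by moving the start
--             s += 1
--         if s < e and words[e - 1] == 'and':   # strip one trailing 'and'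
--             e -= 1
--         if s < e:
--             phrases.append(words[s:e])
--     return phrases
-- ===== Notes on version B (the rewrite author's own statement) =====
-- stated objective: faster
-- what changed: Replaced the dual-index nested while loops (each word tested by a linear scan of the vocab list) by staged passes: build a frozenset membership mask once, extract run start/end boundaries with two index comprehensions, then for each zipped (start,end) interval strip one 'and' per side by index arithmetic and append the slice.
import Mathlib
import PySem

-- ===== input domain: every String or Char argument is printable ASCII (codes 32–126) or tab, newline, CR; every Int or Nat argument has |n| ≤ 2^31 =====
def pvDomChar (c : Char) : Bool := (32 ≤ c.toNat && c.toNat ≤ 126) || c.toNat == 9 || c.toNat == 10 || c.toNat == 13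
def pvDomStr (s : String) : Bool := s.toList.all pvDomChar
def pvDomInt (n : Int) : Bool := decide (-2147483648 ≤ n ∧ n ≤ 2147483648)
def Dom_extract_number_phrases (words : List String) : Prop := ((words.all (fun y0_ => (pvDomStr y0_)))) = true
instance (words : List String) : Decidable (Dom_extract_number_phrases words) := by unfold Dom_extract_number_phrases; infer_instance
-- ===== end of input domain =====

-- B replaces A's dual-index nested while loops by staged passes: a frozenset
-- membership mask, two index comprehensions for run boundaries, then zip +
-- slicing with index arithmetic for the single-'and' trims; objective: faster
-- (constant factor: no per-word linear scan of the vocab list).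

-- ===== PORT A =====

def numberVocabA : List String :=
  ["one", "two", "three", "four", "five", "six", "seven", "eight", "nine", "ten",
   "eleven", "twelve", "thirteen", "fourteen", "fifteen", "sixteen", "seventeen",
   "eighteen", "nineteen", "twenty", "thirty", "forty", "fifty", "sixty", "seventy",
   "eighty", "ninety", "hundred", "thousand", "million", "billion", "trillion", "and"]

-- inner `while i < len(words) and words[i] in number_vocab` loop: returns the
-- collected phrase and the remaining suffix of the list
def collectA : List String → List String × List String
  | [] => ([], [])
  | w :: rest =>
      if w ∈ numberVocabA then
        let pr := collectA rest
        (w :: pr.1, pr.2)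
      else ([], w :: rest)

theorem collectA_snd_length_le : ∀ (l : List String), (collectA l).2.length ≤ l.length
  | [] => by simp [collectA]
  | w :: rest => by
      by_cases h : w ∈ numberVocabA
      · simpa [collectA, h] using Nat.le_succ_of_le (collectA_snd_length_le rest)
      · simp [collectA, h]

def extract_number_phrases (words : List String) : List (List String)  :=
  match words with
  | [] => []
  | w :: rest =>
      if w ∈ numberVocabA then
        let pr := collectA rest
        let phrase := w :: pr.1
        -- if phrase[0] == 'and': phrase = phrase[1:]
        let phrase := if phrase.head? = some "and" then phrase.drop 1 else phrase
        -- if phrase and phrase[-1] == 'and': phrase = phrase[:-1]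
        let phrase := if phrase ≠ [] ∧ phrase.getLast? = some "and" then phrase.dropLast else phrase
        (if phrase ≠ [] then [phrase] else []) ++ extract_number_phrases pr.2
      else extract_number_phrases rest
termination_by words.length
decreasing_by
  · exact Nat.lt_succ_of_le (collectA_snd_length_le rest)
  · simp

-- ===== PORT B =====

def numberVocabB : PySem.Set String :=
  PySem.Set.ofList
    ["one", "two", "three", "four", "five", "six", "seven", "eight", "nine", "ten",
     "eleven", "twelve", "thirteen", "fourteen", "fifteen", "sixteen", "seventeen",
     "eighteen", "nineteen", "twenty", "thirty", "forty", "fifty", "sixty", "seventy",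
     "eighty", "ninety", "hundred", "thousand", "million", "billion", "trillion", "and"]

-- body of the `for s, e in zip(starts, ends)` loop
def stepB (words : List String) (phrases : List (List String)) (p : Nat × Nat) :
    List (List String) :=
  let s := if words.getD p.1 "" = "and" then p.1 + 1 else p.1
  let e := if s < p.2 ∧ words.getD (p.2 - 1) "" = "and" then p.2 - 1 else p.2
  if s < e then phrases ++ [PySem.List.slice words (some (s : Int)) (some (e : Int))]
  else phrases

def extract_number_phrases_alt (words : List String) : List (List String) :=
  let n := words.length
  let mask := words.map (fun w => decide (w ∈ numberVocabB))
  let starts := (List.range n).filter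
    (fun i => mask.getD i false && (decide (i = 0) || !(mask.getD (i - 1) false)))
  let ends := ((List.range n).filter
    (fun i => mask.getD i false && (decide (i = n - 1) || !(mask.getD (i + 1) false)))).map (· + 1)
  (starts.zip ends).foldl (stepB words) []

-- ===== PRECONDITION & SPEC =====

def Spec_extract_number_phrases (words : List String) (out : List (List String)) : Prop :=
  out = extract_number_phrases_alt words
instance (words : List String) (out : List (List String)) :
    Decidable (Spec_extract_number_phrases words out) := by
  unfold Spec_extract_number_phrases; infer_instance

-- ===== CLAIM =====

def Claim_equal_extract_number_phrases : Prop :=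
  ∀ (words : List String), Dom_extract_number_phrases words →
    Spec_extract_number_phrases words (extract_number_phrases words)

-- ===== LEMMAS AND PROOFS =====

theorem vocabB_eq_vocabA : ∀ (w : String), (w ∈ numberVocabB) ↔ (w ∈ numberVocabA) := by
  intro w
  constructor <;> intro h <;> simpa [numberVocabA, numberVocabB, PySem.Set.ofList] using h

-- proof-side names for B's staged passes, with the boundary condition
-- generalised by the markedness of the previous (`prev`) element
def maskOf (words : List String) : List Bool :=
  words.map (fun w => decide (w ∈ numberVocabB))

def startsP (prev : Bool) (m : List Bool) : List Nat :=
  (List.range m.length).filter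
    (fun i => m.getD i false && (if i = 0 then !prev else !(m.getD (i - 1) false)))

def endsE (m : List Bool) : List Nat :=
  ((List.range m.length).filter
    (fun i => m.getD i false && !(m.getD (i + 1) false))).map (· + 1)

-- A-style trim of a run, and flushing it onto the accumulator
def coreB (run : List String) : List String :=
  let c := if run.head? = some "and" then run.drop 1 else run
  if c ≠ [] ∧ c.getLast? = some "and" then c.dropLast else c

def flushB (phrases : List (List String)) (run : List String) : List (List String) :=
  if coreB run ≠ [] then phrases ++ [coreB run] else phrases

theorem collectA_append (p : List String) (hp : ∀ x ∈ p, x ∈ numberVocabA)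
    (rest : List String) :
    collectA (p ++ rest) = (p ++ (collectA rest).1, (collectA rest).2) := by
  induction p with
  | nil => simp
  | cons w t ih =>
      have hw : w ∈ numberVocabA := hp w (by simp)
      have ht : ∀ x ∈ t, x ∈ numberVocabA := fun x hx => hp x (by simp [hx])
      simp [collectA, hw, ih ht]

theorem extract_run (run : List String) (hne : run ≠ [])
    (hall : ∀ x ∈ run, x ∈ numberVocabA) (rest : List String)
    (hp : (collectA rest).1 = []) :
    extract_number_phrases (run ++ rest) =
      flushB [] run ++ extract_number_phrases (collectA rest).2 := by
  cases run with
  | nil => exact absurd rfl hne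
  | cons w t =>
      have hw : w ∈ numberVocabA := hall w (by simp)
      have ht : ∀ x ∈ t, x ∈ numberVocabA := fun x hx => hall x (by simp [hx])
      rw [List.cons_append, extract_number_phrases]
      simp only [hw, collectA_append t ht rest, hp]
      simp [flushB, coreB]

theorem flushB_append (phrases : List (List String)) (run : List String) :
    flushB phrases run = phrases ++ flushB [] run := by
  unfold flushB
  by_cases h : coreB run = [] <;> simp [h]

theorem collectA_fst_mem_vocab : ∀ (l : List String), ∀ x ∈ (collectA l).1, x ∈ numberVocabA := by
  intro l
  induction l with
  | nil => simp [collectA]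
  | cons w rest ih =>
      by_cases h : w ∈ numberVocabA
      · intro x hx
        simp only [collectA, h, if_true] at hx
        rcases List.mem_cons.1 hx with rfl | hx
        · exact h
        · exact ih x hx
      · simp [collectA, h]

theorem collectA_decomp : ∀ (l : List String), l = (collectA l).1 ++ (collectA l).2 := by
  intro l
  induction l with
  | nil => simp [collectA]
  | cons w rest ih =>
      by_cases h : w ∈ numberVocabA
      · simpa [collectA, h] using ih
      · simp [collectA, h]

theorem collectA_snd_head : ∀ (l : List String),
    (collectA l).2 = [] ∨ ∃ x t, (collectA l).2 = x :: t ∧ x ∉ numberVocabA := by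
  intro l
  induction l with
  | nil => simp [collectA]
  | cons w rest ih =>
      by_cases h : w ∈ numberVocabA
      · simpa [collectA, h] using ih
      · exact Or.inr ⟨w, rest, by simp [collectA, h], h⟩

-- members of endsE are positive
theorem one_le_mem_endsE (m : List Bool) (x : Nat) (hx : x ∈ endsE m) : 1 ≤ x := by
  unfold endsE at hx
  rcases List.mem_map.1 hx with ⟨y, _, rfl⟩
  omega

-- structural cons laws for the boundary lists
theorem startsP_cons (prev b : Bool) (t : List Bool) :
    startsP prev (b :: t) =
      (if b && !prev then [0] else []) ++ (startsP b t).map (· + 1) := by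
  unfold startsP
  rw [show (b :: t).length = t.length + 1 from rfl, List.range_succ_eq_map,
    List.filter_cons]
  have hmap : ((List.range t.length).map Nat.succ).filter
      (fun i => (b :: t).getD i false &&
        (if i = 0 then !prev else !((b :: t).getD (i - 1) false))) =
      ((List.range t.length).filter
        (fun i => t.getD i false && (if i = 0 then !b else !(t.getD (i - 1) false)))).map Nat.succ := by
    rw [List.filter_map]
    congr 1
    apply List.filter_congr
    intro i _
    cases i with
    | zero => simp
    | succ j => simp
  rw [hmap]
  cases b <;> cases prev <;> simp

theorem endsE_cons (b : Bool) (t : List Bool) :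
    endsE (b :: t) =
      (if b && !(t.getD 0 false) then [1] else []) ++ (endsE t).map (· + 1) := by
  unfold endsE
  rw [show (b :: t).length = t.length + 1 from rfl, List.range_succ_eq_map,
    List.filter_cons]
  have hmap : ((List.range t.length).map Nat.succ).filter
      (fun i => (b :: t).getD i false && !((b :: t).getD (i + 1) false)) =
      ((List.range t.length).filter
        (fun i => t.getD i false && !(t.getD (i + 1) false))).map Nat.succ := by
    rw [List.filter_map]
    rfl
  rw [hmap]
  cases b <;> cases ht0 : t.getD 0 false <;>
    simp_all [List.getD, List.map_map, Function.comp_def]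

theorem startsP_head_false (m : List Bool) (h : m.getD 0 false = false) :
    startsP true m = startsP false m := by
  cases m with
  | nil => rfl
  | cons b t =>
      have hb : b = false := by simpa using h
      subst hb
      rw [startsP_cons, startsP_cons]
      simp

theorem startsP_block : ∀ (j : Nat) (m : List Bool), m.getD 0 false = false →
    startsP true (List.replicate j true ++ m) = (startsP false m).map (· + j)
  | 0, m, h => by simpa using (startsP_head_false m h).trans (by simp)
  | j + 1, m, h => by
      rw [List.replicate_succ, List.cons_append, startsP_cons, startsP_block j m h]
      simp [List.map_map, Function.comp_def, Nat.add_assoc]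

theorem endsE_block : ∀ (k : Nat), 1 ≤ k → ∀ (m : List Bool), m.getD 0 false = false →
    endsE (List.replicate k true ++ m) = k :: (endsE m).map (· + k)
  | 1, _, m, h => by
      rw [show List.replicate 1 true ++ m = true :: m by simp, endsE_cons, h]
      simp
  | k + 2, _, m, h => by
      rw [List.replicate_succ, List.cons_append, endsE_cons,
        endsE_block (k + 1) (by omega) m h]
      have hgd : ((List.replicate (k + 1) true ++ m).getD 0 false) = true := by
        simp [List.replicate_succ]
      rw [hgd]
      simp [List.map_map, Function.comp_def, Nat.add_assoc]

-- mask of an all-vocab run is all-true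
theorem maskOf_run (r : List String) (h : ∀ x ∈ r, x ∈ numberVocabA) :
    maskOf r = List.replicate r.length true := by
  induction r with
  | nil => rfl
  | cons w t ih =>
      have hw : w ∈ numberVocabB := (vocabB_eq_vocabA w).2 (h w (by simp))
      simp [maskOf, List.replicate_succ, hw]
      simpa [maskOf] using ih (fun x hx => h x (by simp [hx]))

theorem maskOf_append (l l' : List String) : maskOf (l ++ l') = maskOf l ++ maskOf l' := by
  simp [maskOf]

-- shifting a pair by the length of a prefix commutes with the loop body
theorem slice_shift (pre ws : List String) (s e : Nat) :
    PySem.List.slice (pre ++ ws) (some ((s + pre.length : Nat) : Int))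
      (some ((e + pre.length : Nat) : Int))
      = PySem.List.slice ws (some (s : Int)) (some (e : Int)) := by
  rw [PySem.List.slice_natCast, PySem.List.slice_natCast,
    show s + pre.length = pre.length + s by omega, List.drop_length_add_append]
  congr 1
  omega

theorem slice_shift' (pre ws : List String) (a b c d : Nat)
    (hc : a = c + pre.length) (hd : b = d + pre.length) :
    PySem.List.slice (pre ++ ws) (some (a : Int)) (some (b : Int))
      = PySem.List.slice ws (some (c : Int)) (some (d : Int)) := by
  subst hc hd
  exact slice_shift pre ws c d

theorem stepB_shift (pre ws : List String) (acc : List (List String)) (p : Nat × Nat)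
    (he : 1 ≤ p.2) :
    stepB (pre ++ ws) acc (p.1 + pre.length, p.2 + pre.length) = stepB ws acc p := by
  obtain ⟨s, e0⟩ := p
  obtain ⟨e, rfl⟩ : ∃ e', e0 = e' + 1 := ⟨e0 - 1, by simp at he; omega⟩
  unfold stepB
  have hg1 : (pre ++ ws).getD (s + pre.length) "" = ws.getD s "" := by
    rw [List.getD_append_right _ _ _ _ (by omega)]; congr 1; omega
  have hg2 : (pre ++ ws).getD (e + 1 + pre.length - 1) "" = ws.getD (e + 1 - 1) "" := by
    rw [List.getD_append_right _ _ _ _ (by omega)]; congr 1; omega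
  simp only [hg1, hg2]
  by_cases h1 : ws.getD s "" = "and" <;>
    simp only [h1, if_true, if_false] <;>
    simp only [show (s + pre.length + 1 < e + 1 + pre.length) ↔ (s + 1 < e + 1) from by omega,
               show (s + pre.length < e + 1 + pre.length) ↔ (s < e + 1) from by omega] <;>
    split_ifs with h2 h3 <;>
    first
      | rfl
      | (exfalso; omega)
      | (refine congrArg (fun z => acc ++ [z]) (slice_shift' pre ws _ _ _ _ ?_ ?_) <;> omega)

theorem fold_shift (pre ws : List String) (acc : List (List String))
    (pairs : List (Nat × Nat)) (h : ∀ p ∈ pairs, 1 ≤ p.2) :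
    (pairs.map (fun p => (p.1 + pre.length, p.2 + pre.length))).foldl
      (stepB (pre ++ ws)) acc = pairs.foldl (stepB ws) acc := by
  rw [List.foldl_map]
  exact PySem.List.foldl_congr_mem _ _ _ _
    (fun acc p hp => stepB_shift pre ws acc p (h p hp))

-- processing the interval of a whole run equals A-style trim-and-flush
theorem slice_prefix (run rest' : List String) (s e : Nat) (hs : s ≤ run.length)
    (he : e ≤ run.length) :
    PySem.List.slice (run ++ rest') (some (s : Int)) (some (e : Int))
      = (run.drop s).take (e - s) := by
  rw [PySem.List.slice_natCast, List.drop_append,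
    List.take_append_of_le_length (by simp; omega)]

theorem stepB_run' (run rest' : List String) (acc : List (List String)) (hne : run ≠ []) :
    stepB (run ++ rest') acc (0, run.length) =
      (let s := if run.getD 0 "" = "and" then 1 else 0
       let e := if s < run.length ∧ run.getD (run.length - 1) "" = "and"
                then run.length - 1 else run.length
       if s < e then acc ++ [(run.drop s).take (e - s)] else acc) := by
  have hpos : 0 < run.length := List.length_pos_of_ne_nil hne
  unfold stepB
  have hg0 : (run ++ rest').getD 0 "" = run.getD 0 "" := List.getD_append _ _ _ _ hpos
  have hgl : (run ++ rest').getD (run.length - 1) "" = run.getD (run.length - 1) "" :=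
    List.getD_append _ _ _ _ (by omega)
  simp only [hg0, hgl, Nat.zero_add]
  split_ifs <;>
    first
      | rfl
      | omega
      | exact congrArg (fun z => acc ++ [z]) (slice_prefix run rest' _ _ (by omega) (by omega))

theorem flush_eq (run : List String) (acc : List (List String)) (hne : run ≠ []) :
    (let s := if run.getD 0 "" = "and" then 1 else 0
     let e := if s < run.length ∧ run.getD (run.length - 1) "" = "and"
              then run.length - 1 else run.length
     if s < e then acc ++ [(run.drop s).take (e - s)] else acc) = flushB acc run := by
  obtain ⟨w, t, rfl⟩ : ∃ w t, run = w :: t := by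
    cases run with
    | nil => exact absurd rfl hne
    | cons a b => exact ⟨_, _, rfl⟩
  rcases t.eq_nil_or_concat with rfl | ⟨mid, z, rfl⟩
  · by_cases hw : w = "and" <;> simp [coreB, flushB, hw]
  · have hgl : (w :: (mid.concat z)).getD ((w :: (mid.concat z)).length - 1) "" = z := by
      rw [show (w :: (mid.concat z)).length - 1 = mid.length + 1 by simp]
      show (mid.concat z).getD mid.length "" = z
      rw [List.concat_eq_append, List.getD_append_right _ _ _ _ (le_refl _)]
      simp
    have hgl2 : (w :: (mid ++ [z])).getLast? = some z := by
      rw [← List.cons_append, List.getLast?_concat]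
    have hdl : (w :: (mid ++ [z])).dropLast = w :: mid := by
      rw [← List.cons_append, List.dropLast_concat]
    have htk : (mid ++ [z]).take (mid.length + 1) = mid ++ [z] := by
      rw [show mid.length + 1 = (mid ++ [z]).length by simp, List.take_length]
    by_cases hw : w = "and" <;> by_cases hz : z = "and"
    · subst hw; subst hz
      simp [coreB, flushB, List.concat_eq_append]
      cases mid with | nil => simp | cons a b => simp
    · subst hw
      simp [coreB, flushB, List.concat_eq_append, hz, htk]
    · subst hz
      simp [coreB, flushB, List.concat_eq_append, hgl2, hdl, hw]
    · simp [coreB, flushB, List.concat_eq_append, hgl2, htk, hw, hz]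

theorem stepB_run (run rest' : List String) (acc : List (List String)) (hne : run ≠ []) :
    stepB (run ++ rest') acc (0, run.length) = flushB acc run :=
  (stepB_run' run rest' acc hne).trans (flush_eq run acc hne)

-- the two filters in the port equal startsP/endsE
theorem alt_eq_fold (words : List String) :
    extract_number_phrases_alt words =
      ((startsP false (maskOf words)).zip (endsE (maskOf words))).foldl (stepB words) [] := by
  have hstarts : (List.range words.length).filter
      (fun i => (maskOf words).getD i false &&
        (decide (i = 0) || !((maskOf words).getD (i - 1) false)))
      = startsP false (maskOf words) := by
    unfold startsP
    rw [show (maskOf words).length = words.length by simp [maskOf]]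
    apply List.filter_congr
    intro i _
    cases i <;> simp
  have hends : ((List.range words.length).filter
      (fun i => (maskOf words).getD i false &&
        (decide (i = words.length - 1) || !((maskOf words).getD (i + 1) false)))).map (· + 1)
      = endsE (maskOf words) := by
    unfold endsE
    rw [show (maskOf words).length = words.length by simp [maskOf]]
    congr 1
    apply List.filter_congr
    intro i hi
    have hi' : i < words.length := List.mem_range.1 hi
    by_cases h : i = words.length - 1
    · have hd : (maskOf words).getD (i + 1) false = false := by
        apply List.getD_eq_default
        simp [maskOf]
        omega
      rw [h] at hd
      simp [h]
      intro _
      simpa [List.getD] using hd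
    · simp [h]
  show ((((List.range words.length).filter
      (fun i => (maskOf words).getD i false &&
        (decide (i = 0) || !((maskOf words).getD (i - 1) false)))).zip
      (((List.range words.length).filter
      (fun i => (maskOf words).getD i false &&
        (decide (i = words.length - 1) || !((maskOf words).getD (i + 1) false)))).map (· + 1))).foldl
      (stepB words) []) = _
  rw [hstarts, hends]

theorem main_invariant : ∀ (words : List String) (acc : List (List String)),
    ((startsP false (maskOf words)).zip (endsE (maskOf words))).foldl (stepB words) acc
      = acc ++ extract_number_phrases words
  | [], acc => by
      rw [extract_number_phrases]
      simp [maskOf, startsP, endsE]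
  | w :: rest, acc => by
      by_cases hw : w ∈ numberVocabA
      · -- the maximal run starting at w, and the remainder after it
        obtain ⟨p1, p2, hcol⟩ : ∃ p1 p2, collectA rest = (p1, p2) := ⟨_, _, rfl⟩
        have hrest : rest = p1 ++ p2 := by
          have := collectA_decomp rest
          rwa [hcol] at this
        have hall : ∀ x ∈ w :: p1, x ∈ numberVocabA := by
          intro x hx
          rcases List.mem_cons.1 hx with rfl | hx
          · exact hw
          · exact collectA_fst_mem_vocab rest x (by rw [hcol]; exact hx)
        have hcr : collectA p2 = ([], p2) := by
          rcases collectA_snd_head rest with h0 | ⟨x, t, h0, hxv⟩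
          · rw [hcol] at h0
            simp only at h0
            simp [h0, collectA]
          · rw [hcol] at h0
            simp only at h0
            rw [h0]
            simp [collectA, hxv]
        have hhead : (maskOf p2).getD 0 false = false := by
          cases hp2 : p2 with
          | nil => simp [maskOf]
          | cons x t =>
              have hxv : x ∉ numberVocabA := by
                intro hxx
                rw [hp2] at hcr
                simp [collectA, hxx] at hcr
              have hxB : x ∉ numberVocabB := fun h => hxv ((vocabB_eq_vocabA x).1 h)
              simp [maskOf, hxB]
        have hwords : w :: rest = (w :: p1) ++ p2 := by rw [hrest]; rfl
        have hmask : maskOf ((w :: p1) ++ p2)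
            = List.replicate (w :: p1).length true ++ maskOf p2 := by
          rw [maskOf_append, maskOf_run _ hall]
        have hstarts : startsP false (maskOf ((w :: p1) ++ p2))
            = 0 :: (startsP false (maskOf p2)).map (· + (w :: p1).length) := by
          rw [hmask, show (w :: p1).length = p1.length + 1 by simp, List.replicate_succ,
            List.cons_append, startsP_cons, startsP_block p1.length _ hhead]
          simp [List.map_map, Function.comp_def, Nat.add_assoc]
        have hends : endsE (maskOf ((w :: p1) ++ p2))
            = (w :: p1).length :: (endsE (maskOf p2)).map (· + (w :: p1).length) := by
          rw [hmask, show (w :: p1).length = p1.length + 1 by simp]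
          exact endsE_block (p1.length + 1) (by omega) _ hhead
        rw [hwords, hstarts, hends, List.zip_cons_cons, List.zip_map, List.foldl_cons,
          stepB_run (w :: p1) p2 acc (by simp)]
        rw [show (Prod.map (· + (w :: p1).length) (· + (w :: p1).length) :
              Nat × Nat → Nat × Nat)
            = (fun p => (p.1 + (w :: p1).length, p.2 + (w :: p1).length)) by
          funext p; cases p; rfl]
        rw [fold_shift (w :: p1) p2 (flushB acc (w :: p1)) _
          (fun p hp => one_le_mem_endsE _ p.2 (List.of_mem_zip hp).2)]
        rw [main_invariant p2 (flushB acc (w :: p1))]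
        rw [extract_run (w :: p1) (by simp) hall p2 (by rw [hcr])]
        rw [hcr, flushB_append]
        simp
      · have hwB : w ∉ numberVocabB := fun h => hw ((vocabB_eq_vocabA w).1 h)
        have hm : maskOf (w :: rest) = false :: maskOf rest := by simp [maskOf, hwB]
        have hA : extract_number_phrases (w :: rest) = extract_number_phrases rest := by
          rw [extract_number_phrases]; simp [hw]
        rw [hm, hA, startsP_cons, endsE_cons]
        simp only [Bool.false_and, Bool.false_eq_true, if_false, List.nil_append]
        rw [List.zip_map]
        rw [show (Prod.map (· + 1) (· + 1) : Nat × Nat → Nat × Nat)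
            = (fun p => (p.1 + [w].length, p.2 + [w].length)) by
          funext p; cases p; rfl]
        rw [show (w :: rest) = [w] ++ rest from rfl,
          fold_shift [w] rest acc _
            (fun p hp => one_le_mem_endsE _ p.2 (List.of_mem_zip hp).2)]
        exact main_invariant rest acc
termination_by words => words.length
decreasing_by
  · have h := collectA_snd_length_le rest
    rw [hcol] at h
    simp only at h
    simp
    omega
  · simp

-- ===== VERDICT =====

theorem extract_number_phrases_spec : Claim_equal_extract_number_phrases := by
  intro words _
  unfold Spec_extract_number_phrases
  rw [alt_eq_fold, main_invariant]
  simp
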